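-- pv_equiv track=rewrite | github.com/lonelywolf1981/lab_viewer | server.py | _resolve_channel
-- ===== SOURCE A (Python) =====
-- from typing import List, Dict, Any, Tuple
--
-- def _resolve_channel(cols: List[str], key: str) -> str:
--     """Resolve sensor code from available columns by semantic key."""
--     # special channels without prefix
--     if key in ("T-sie", "UR-sie"):
--         return key if key in cols else ""
--
--     # common suffix mapping (prefer A- then C-)
--     candidates = [f"A-{key}", f"C-{key}", key]
--     for c in candidates:
--         if c in cols:
--             return c
--
--     # fallback: find any ending with -key
--     suf = "-" + key
--     for c in cols:
--         if c.endswith(suf):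
--             return c
--     return ""
-- ===== SOURCE B (Python) =====
-- def _resolve_channel(cols, key):
--     """Resolve sensor code from available columns by semantic key (single scoring pass)."""
--     if key in ("T-sie", "UR-sie"):
--         return key if key in cols else ""
--     best = None  # (priority, column); lower priority wins, first occurrence wins ties
--     for c in cols:
--         if c == "A-" + key:
--             p = 0
--         elif c == "C-" + key:
--             p = 1
--         elif c == key:
--             p = 2
--         elif c.endswith("-" + key):
--             p = 3
--         else:
--             p = None
--         if p is not None and (best is None or p < best[0]):
--             best = (p, c)
--     return best[1] if best is not None else ""
-- ===== Notes on version B (the rewrite author's own statement) =====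
-- stated objective: alternative
-- what changed: Replaced the fixed-candidate membership checks plus a separate fallback suffix scan with one pass over cols that scores each column (0 for A-key, 1 for C-key, 2 for key, 3 for any -key suffix) and keeps the strictly-lowest-priority, earliest column.
import Mathlib
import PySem

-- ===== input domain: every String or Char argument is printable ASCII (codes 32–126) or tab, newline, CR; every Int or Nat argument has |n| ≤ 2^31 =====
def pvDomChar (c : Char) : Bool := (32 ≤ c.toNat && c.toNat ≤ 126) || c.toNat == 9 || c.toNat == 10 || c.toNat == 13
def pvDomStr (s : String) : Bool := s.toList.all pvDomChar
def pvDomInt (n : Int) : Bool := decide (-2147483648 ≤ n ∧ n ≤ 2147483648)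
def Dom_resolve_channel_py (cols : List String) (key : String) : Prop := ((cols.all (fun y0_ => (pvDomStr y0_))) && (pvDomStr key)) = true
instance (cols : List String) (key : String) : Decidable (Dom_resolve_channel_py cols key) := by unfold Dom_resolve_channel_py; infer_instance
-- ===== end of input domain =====

-- B replaces A's candidate-membership checks + fallback suffix scan with one scoring pass over cols (alternative decomposition, same cost).


-- ===== PORT A =====
-- A's `for c in candidates: if c in cols: return c`
def firstInA : List String → List String → Option String
  | [], _ => none
  | c :: cs, cols => if c ∈ cols then some c else firstInA cs cols

-- A's fallback `for c in cols: if c.endswith(suf): return c`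
def firstEndsA : List String → String → Option String
  | [], _ => none
  | c :: cs, suf => if PySem.Str.endswith c suf then some c else firstEndsA cs suf

def resolve_channel_py (cols : List String) (key : String) : String :=
  if key = "T-sie" ∨ key = "UR-sie" then
    if key ∈ cols then key else ""
  else
    match firstInA ["A-" ++ key, "C-" ++ key, key] cols with
    | some c => c
    | none =>
      match firstEndsA cols ("-" ++ key) with
      | some c => c
      | none => ""

-- ===== PORT B =====
-- B's per-column priority
def prioB (key c : String) : Option Nat :=
  if c = "A-" ++ key then some 0
  else if c = "C-" ++ key then some 1
  else if c = key then some 2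
  else if PySem.Str.endswith c ("-" ++ key) then some 3
  else none

-- B's loop body: replace best only with a strictly lower priority
def stepB (key : String) (best : Option (Nat × String)) (c : String) : Option (Nat × String) :=
  match prioB key c, best with
  | none, b => b
  | some p, none => some (p, c)
  | some p, some (bp, bc) => if p < bp then some (p, c) else some (bp, bc)

def resolve_channel_py_alt (cols : List String) (key : String) : String :=
  if key = "T-sie" ∨ key = "UR-sie" then
    if key ∈ cols then key else ""
  else
    match cols.foldl (stepB key) none with
    | some (_, c) => c
    | none => ""

-- ===== PRECONDITION & SPEC =====
def Spec_resolve_channel_py (cols : List String) (key : String) (out : String) : Prop := out = resolve_channel_py_alt cols key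
instance (cols : List String) (key : String) (out : String) : Decidable (Spec_resolve_channel_py cols key out) := by unfold Spec_resolve_channel_py; infer_instance

-- ===== CLAIM (what is proved, stated in full; the proofs are below) =====
def Claim_equal_resolve_channel_py : Prop := ∀ (cols : List String) (key : String), Dom_resolve_channel_py cols key → Spec_resolve_channel_py cols key (resolve_channel_py cols key)

-- ===== LEMMAS AND PROOFS =====

-- lowest priority wins, ties to the left
def mrg (x y : Option (Nat × String)) : Option (Nat × String) :=
  match x, y with
  | none, y => y
  | some a, none => some a
  | some a, some b => if b.1 < a.1 then some b else some a

lemma stepB_eq_mrg (key : String) (best : Option (Nat × String)) (c : String) :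
    stepB key best c = mrg best ((prioB key c).map (fun p => (p, c))) := by
  cases h : prioB key c <;> cases best <;> simp [stepB, mrg, h]

lemma mrg_assoc (x y z : Option (Nat × String)) : mrg (mrg x y) z = mrg x (mrg y z) := by
  rcases x with _ | x <;> rcases y with _ | y <;> rcases z with _ | z <;>
    simp only [mrg] <;> split_ifs <;> simp only [mrg] <;> split_ifs <;>
    first | rfl | (exfalso; omega)

-- closed form of B's fold
def Bchar (key : String) (l : List String) : Option (Nat × String) :=
  if ("A-" ++ key) ∈ l then some (0, "A-" ++ key)
  else if ("C-" ++ key) ∈ l then some (1, "C-" ++ key)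
  else if key ∈ l then some (2, key)
  else (firstEndsA l ("-" ++ key)).map (fun c => (3, c))

lemma mrg_left_zero (s : String) (y : Option (Nat × String)) :
    mrg (some (0, s)) y = some (0, s) := by
  cases y <;> simp [mrg]

lemma Bchar_cons (key c : String) (l : List String) :
    Bchar key (c :: l) = mrg ((prioB key c).map (fun p => (p, c))) (Bchar key l) := by
  by_cases ha : c = "A-" ++ key
  · subst ha
    simp [Bchar, prioB, List.mem_cons, mrg_left_zero]
  · have ha' : ¬("A-" ++ key = c) := fun h => ha h.symm
    by_cases hb : c = "C-" ++ key
    · subst hb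
      by_cases ma : "A-" ++ key ∈ l
      · simp [Bchar, prioB, List.mem_cons, ha, ha', ma, mrg]
      · by_cases mb : "C-" ++ key ∈ l
        · simp [Bchar, prioB, List.mem_cons, ha, ha', ma, mb, mrg]
        · by_cases mk : key ∈ l <;>
            cases h : firstEndsA l ("-" ++ key) <;>
            simp [Bchar, prioB, List.mem_cons, ha, ha', ma, mb, mk, h, mrg]
    · have hb' : ¬("C-" ++ key = c) := fun h => hb h.symm
      by_cases hk : c = key
      · subst hk
        by_cases ma : "A-" ++ c ∈ l
        · simp [Bchar, prioB, List.mem_cons, ha, ha', hb, hb', ma, mrg]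
        · by_cases mb : "C-" ++ c ∈ l
          · simp [Bchar, prioB, List.mem_cons, ha, ha', hb, hb', ma, mb, mrg]
          · by_cases mk : c ∈ l <;>
              cases h : firstEndsA l ("-" ++ c) <;>
              simp [Bchar, prioB, List.mem_cons, ha, ha', hb, hb', ma, mb, mk, h, mrg]
      · have hk' : ¬(key = c) := fun h => hk h.symm
        by_cases he : PySem.Chars.endswith c.toList ('-' :: key.toList) = true
        · by_cases ma : "A-" ++ key ∈ l
          · simp [Bchar, prioB, List.mem_cons, ha, ha', hb, hb', hk, hk', he, ma, mrg]
          · by_cases mb : "C-" ++ key ∈ l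
            · simp [Bchar, prioB, List.mem_cons, ha, ha', hb, hb', hk, hk', he, ma, mb, mrg]
            · by_cases mk : key ∈ l <;>
                cases h : firstEndsA l ("-" ++ key) <;>
                simp [Bchar, prioB, firstEndsA, List.mem_cons, ha, ha', hb, hb', hk, hk', he,
                  ma, mb, mk, h, mrg]
        · simp [Bchar, prioB, firstEndsA, List.mem_cons, ha, ha', hb, hb', hk, hk', he, mrg]

lemma foldl_stepB (key : String) : ∀ (l : List String) (acc : Option (Nat × String)),
    l.foldl (stepB key) acc = mrg acc (Bchar key l) := by
  intro l
  induction l with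
  | nil =>
    intro acc
    rcases acc with _ | a <;> simp [Bchar, firstEndsA, mrg]
  | cons c cs ih =>
    intro acc
    calc (c :: cs).foldl (stepB key) acc
        = cs.foldl (stepB key) (stepB key acc c) := rfl
      _ = mrg (mrg acc ((prioB key c).map (fun p => (p, c)))) (Bchar key cs) := by
            rw [ih, stepB_eq_mrg]
      _ = mrg acc (Bchar key (c :: cs)) := by rw [mrg_assoc, Bchar_cons]

lemma mrg_none (y : Option (Nat × String)) : mrg none y = y := rfl

lemma main_eq (cols : List String) (key : String) :
    resolve_channel_py cols key = resolve_channel_py_alt cols key := by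
  unfold resolve_channel_py resolve_channel_py_alt
  by_cases hs : key = "T-sie" ∨ key = "UR-sie"
  · simp [hs]
  · simp only [hs, if_false, foldl_stepB, mrg_none, Bchar]
    by_cases ma : ("A-" ++ key) ∈ cols <;>
    by_cases mb : ("C-" ++ key) ∈ cols <;>
    by_cases mk : key ∈ cols <;>
      simp_all [firstInA] <;>
      (cases firstEndsA cols ("-" ++ key)) <;> simp

-- ===== VERDICT (by name: the statement is the Claim_ definition above) =====
theorem resolve_channel_py_spec : Claim_equal_resolve_channel_py := by
  intro cols key _
  unfold Spec_resolve_channel_py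
  exact main_eq cols key
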